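-- pv_equiv track=rewrite | github.com/revvy02/lyra | scripts/apply_patches.py | fix_patch_content
-- ===== SOURCE A (Python) =====
-- def fix_patch_content(content):
--     content = content.replace('\r\n', '\n').replace('\r', '\n')
--
--     lines = content.splitlines()
--
--     header_lines = []
--     diff_lines = []
--     in_header = True
--
--     for line in lines:
--         if in_header:
--             if line.startswith('---') or line.startswith('+++'):
--                 header_lines.append(line)
--             elif line.startswith('@@'):
--                 in_header = False
--                 diff_lines.append(line)
--         else:
--             diff_lines.append(line)
--
--     return '\n'.join(header_lines + diff_lines) + '\n'
-- ===== SOURCE B (Python) =====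
-- def fix_patch_content(content):
--     content = content.replace('\r\n', '\n').replace('\r', '\n')
--     lines = content.splitlines()
--     idx = next((i for i, l in enumerate(lines) if l.startswith('@@')), None)
--     if idx is None:
--         header = [l for l in lines if l.startswith('---') or l.startswith('+++')]
--         return '\n'.join(header) + '\n'
--     header = [l for l in lines[:idx] if l.startswith('---') or l.startswith('+++')]
--     return '\n'.join(header + lines[idx:]) + '\n'
-- ===== Notes on version B (the rewrite author's own statement) =====
-- stated objective: simpler
-- what changed: Replaces A's stateful single pass (in_header flag with two accumulators) by locating the first '@@' line, filtering the header prefix, and keeping the suffix slice verbatim.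
import Mathlib
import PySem

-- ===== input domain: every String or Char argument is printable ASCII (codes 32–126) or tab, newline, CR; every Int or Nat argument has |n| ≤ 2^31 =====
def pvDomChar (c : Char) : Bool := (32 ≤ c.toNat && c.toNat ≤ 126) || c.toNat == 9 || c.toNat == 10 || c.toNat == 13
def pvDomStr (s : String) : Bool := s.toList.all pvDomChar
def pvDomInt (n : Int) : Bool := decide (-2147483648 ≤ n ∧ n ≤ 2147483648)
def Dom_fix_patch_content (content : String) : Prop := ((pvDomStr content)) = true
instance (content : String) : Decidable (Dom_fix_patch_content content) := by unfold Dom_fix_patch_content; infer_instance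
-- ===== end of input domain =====

-- B replaces A's stateful single pass by locate-first-'@@'-then-partition; objective: simpler.

-- shared line tests (the two startswith checks both Pythons perform)
def pvIsHdr (l : String) : Bool := PySem.Str.startswith l "---" || PySem.Str.startswith l "+++"
def pvIsHunk (l : String) : Bool := PySem.Str.startswith l "@@"

-- ===== PORT A =====
-- the loop body of A: state = (header_lines, diff_lines, in_header)
def pvStepA (st : List String × List String × Bool) (line : String) : List String × List String × Bool :=
  if st.2.2 then
    if pvIsHdr line then (st.1 ++ [line], st.2.1, st.2.2)
    else if pvIsHunk line then (st.1, st.2.1 ++ [line], false)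
    else st
  else (st.1, st.2.1 ++ [line], st.2.2)

def fix_patch_content (content : String) : String :=
  let content := PySem.Str.replace (PySem.Str.replace content "\r\n" "\n") "\r" "\n"
  let lines := PySem.Str.splitlines content
  let res := lines.foldl pvStepA ([], [], true)
  PySem.Str.join "\n" (res.1 ++ res.2.1) ++ "\n"

-- ===== PORT B =====
def fix_patch_content_alt (content : String) : String :=
  let content := PySem.Str.replace (PySem.Str.replace content "\r\n" "\n") "\r" "\n"
  let lines := PySem.Str.splitlines content
  match lines.findIdx? pvIsHunk with
  | none => PySem.Str.join "\n" (lines.filter pvIsHdr) ++ "\n"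
  | some i => PySem.Str.join "\n" ((lines.take i).filter pvIsHdr ++ lines.drop i) ++ "\n"

-- ===== PRECONDITION & SPEC =====
def Spec_fix_patch_content (content : String) (out : String) : Prop := out = fix_patch_content_alt content
instance (content : String) (out : String) : Decidable (Spec_fix_patch_content content out) := by unfold Spec_fix_patch_content; infer_instance

-- ===== CLAIM (what is proved, stated in full; the proofs are below) =====
def Claim_equal_fix_patch_content : Prop := ∀ (content : String), Dom_fix_patch_content content → Spec_fix_patch_content content (fix_patch_content content)

-- ===== LEMMAS AND PROOFS =====

-- a line starting with '---' or '+++' cannot start with '@@'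
theorem pv_hdr_not_hunk (l : String) (h : pvIsHdr l = true) : pvIsHunk l = false := by
  unfold pvIsHdr at h
  unfold pvIsHunk
  simp only [PySem.Str.startswith_eq, Bool.or_eq_true, PySem.Chars.startswith_iff] at h
  by_contra hb
  rw [Bool.not_eq_false, PySem.Str.startswith_eq, PySem.Chars.startswith_iff] at hb
  obtain ⟨t, ht⟩ := hb
  have e1 : "---".toList = ['-', '-', '-'] := by decide
  have e2 : "+++".toList = ['+', '+', '+'] := by decide
  have e3 : "@@".toList = ['@', '@'] := by decide
  rw [e3] at ht
  rcases h with ⟨t', ht'⟩ | ⟨t', ht'⟩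
  · rw [← ht', e1] at ht; simp at ht
  · rw [← ht', e2] at ht; simp at ht

-- once in_header is False, every remaining line is appended to diff_lines
theorem pv_loop_false (lines : List String) (h d : List String) :
    lines.foldl pvStepA (h, d, false) = (h, d ++ lines, false) := by
  induction lines generalizing d with
  | nil => simp
  | cons l ls ih =>
      simp only [List.foldl_cons, pvStepA]
      simpa using ih (d ++ [l])

-- characterisation of A's loop while in_header is True
theorem pv_loop_true (lines : List String) (h d : List String) :
    lines.foldl pvStepA (h, d, true) =
      match lines.findIdx? pvIsHunk with
      | none => (h ++ lines.filter pvIsHdr, d, true)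
      | some i => (h ++ (lines.take i).filter pvIsHdr, d ++ lines.drop i, false) := by
  induction lines generalizing h d with
  | nil => simp
  | cons l ls ih =>
      by_cases hh : pvIsHdr l = true
      · have hat := pv_hdr_not_hunk l hh
        simp only [List.foldl_cons, pvStepA, hh, if_true, List.findIdx?_cons, hat,
          Bool.false_eq_true, if_false, ih (h ++ [l]) d]
        cases hfi : ls.findIdx? pvIsHunk with
        | none => simp [hh]
        | some i => simp [hh]
      · simp only [Bool.not_eq_true] at hh
        by_cases hat : pvIsHunk l = true
        · simp only [List.foldl_cons, pvStepA, hh, hat, Bool.false_eq_true, if_false, if_true,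
            List.findIdx?_cons, pv_loop_false]
          simp
        · simp only [Bool.not_eq_true] at hat
          simp only [List.foldl_cons, pvStepA, hh, hat, Bool.false_eq_true, if_false,
            List.findIdx?_cons, ite_true]
          rw [ih h d]
          cases hfi : ls.findIdx? pvIsHunk with
          | none => simp [hh]
          | some i => simp [hh]

-- ===== VERDICT (by name: the statement is the Claim_ definition above) =====
theorem fix_patch_content_spec : Claim_equal_fix_patch_content := by
  intro content _
  unfold Spec_fix_patch_content fix_patch_content fix_patch_content_alt
  simp only [pv_loop_true]
  cases hfi : (PySem.Str.splitlines (PySem.Str.replace (PySem.Str.replace content "\r\n" "\n") "\r" "\n")).findIdx? pvIsHunk with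
  | none => simp
  | some i => simp
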